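-- pv_equiv track=rewrite | github.com/sadhurshan/esai | ai_microservice/chunking.py | _find_preferred_stop
-- ===== SOURCE A (Python) =====
-- _BOUNDARIES: tuple[str, ...] = (
--     "\r\n\r\n",
--     "\n\n",
--     "\r\n",
--     "\n",
--     ". ",
--     "? ",
--     "! ",
--     ".\n",
--     "?\n",
--     "!\n",
-- )
--
-- def _find_preferred_stop(text: str, start: int, hard_stop: int, window: int) -> int:
--     """Locate a natural boundary close to the hard stop if one exists."""
--
--     search_start = max(start + 1, hard_stop - window)
--     best_match = -1
--     for delimiter in _BOUNDARIES:
--         idx = text.rfind(delimiter, search_start, hard_stop)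
--         if idx != -1:
--             candidate_end = idx + len(delimiter)
--             if candidate_end > best_match:
--                 best_match = candidate_end
--     return best_match
-- ===== SOURCE B (Python) =====
-- _BOUNDARIES: tuple[str, ...] = (
--     "\r\n\r\n",
--     "\n\n",
--     "\r\n",
--     "\n",
--     ". ",
--     "? ",
--     "! ",
--     ".\n",
--     "?\n",
--     "!\n",
-- )
--
-- def _find_preferred_stop(text: str, start: int, hard_stop: int, window: int) -> int:
--     """Scan end positions backwards from the hard stop; the first boundary hit is the latest."""
--     search_start = max(start + 1, hard_stop - window)
--     top = min(hard_stop, len(text))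
--     for end in range(top, search_start, -1):
--         for delim in _BOUNDARIES:
--             if text.endswith(delim, search_start, end):
--                 return end
--     return -1
-- ===== Notes on version B (the rewrite author's own statement) =====
-- stated objective: alternative
-- what changed: Replaced A's delimiter-major loop (ten rfind scans over the window, tracking the maximum candidate end) with a single position-major backward sweep over end positions using text.endswith, returning the first (hence latest) position where any boundary delimiter ends; Pre_ restricts to the chunker's natural domain of non-negative offsets, excluding inputs with negative search bounds on which A's value comes from rfind's negative-index wraparound.
-- outside the precondition, e.g. on _find_preferred_stop('bb.b?\nba', -10, -1, 8): A returns 6, B returns -2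
import Mathlib
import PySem

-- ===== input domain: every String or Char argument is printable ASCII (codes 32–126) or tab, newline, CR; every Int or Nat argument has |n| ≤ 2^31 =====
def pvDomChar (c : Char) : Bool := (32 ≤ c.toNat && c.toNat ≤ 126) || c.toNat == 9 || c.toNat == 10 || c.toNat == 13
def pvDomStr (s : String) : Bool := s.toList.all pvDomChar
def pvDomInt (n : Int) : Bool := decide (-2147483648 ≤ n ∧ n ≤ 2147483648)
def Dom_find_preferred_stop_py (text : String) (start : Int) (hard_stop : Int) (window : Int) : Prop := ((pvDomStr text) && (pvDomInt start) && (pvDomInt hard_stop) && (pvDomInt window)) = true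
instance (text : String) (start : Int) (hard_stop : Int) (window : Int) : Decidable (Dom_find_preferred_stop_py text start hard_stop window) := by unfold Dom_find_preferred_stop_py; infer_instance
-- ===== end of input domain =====

-- B replaces A's delimiter-major loop (ten rfind scans, tracking the max end) by a single
-- position-major backward sweep that returns the first (= latest) boundary end; an
-- alternative decomposition with the same exact return value on the stated domain.

-- ===== PORT A =====
def pvBoundaries : List String :=
  ["\r\n\r\n", "\n\n", "\r\n", "\n", ". ", "? ", "! ", ".\n", "?\n", "!\n"]

def find_preferred_stop_py (text : String) (start : Int) (hard_stop : Int) (window : Int) : Int :=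
  let search_start : Int := max (start + 1) (hard_stop - window)
  pvBoundaries.foldl
    (fun best delimiter =>
      let idx := PySem.Str.rfindFrom text delimiter search_start (some hard_stop)
      if idx ≠ -1 then
        let candidate_end := idx + (PySem.Str.len delimiter : Int)
        if candidate_end > best then candidate_end else best
      else best)
    (-1)

-- ===== PORT B =====  (shares the _BOUNDARIES constant with port A)
-- hand port of Source B's 'text.endswith(delim, search_start, end)' — the bounded endswith test;
-- exact for the non-negative search_start admitted by Pre_ and the 0 ≤ end ≤ len(text) of Source B's loop
def pvAltHit (s : List Char) (lo : Int) (e : Int) : Bool :=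
  pvBoundaries.any (fun delim =>
    let L : Int := PySem.Str.len delim
    decide (lo ≤ e - L) && (PySem.List.slice s (some (e - L)) (some e) == delim.toList))

-- the 'for end in range(top, search_start, -1)' loop of Source B, returning on the first hit
def pvAltScan (s : List Char) (lo : Int) : Int → Nat → Int
  | _, 0 => -1
  | e, f + 1 => if pvAltHit s lo e then e else pvAltScan s lo (e - 1) f

def find_preferred_stop_py_alt (text : String) (start : Int) (hard_stop : Int) (window : Int) : Int :=
  let s := text.toList
  let search_start : Int := max (start + 1) (hard_stop - window)
  let top : Int := min hard_stop (s.length : Int)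
  pvAltScan s search_start top (top - search_start).toNat

-- ===== PRECONDITION & SPEC =====
-- Pre_ restricts to the chunker's natural domain of non-negative offsets: it excludes inputs
-- whose search bounds are negative (hard_stop < 0, or both start+1 < 0 and hard_stop-window < 0),
-- where A's value comes from rfind's negative-index wraparound — an artefact of slice semantics.
def Pre_find_preferred_stop_py (text : String) (start : Int) (hard_stop : Int) (window : Int) : Prop :=
  0 ≤ hard_stop ∧ 0 ≤ max (start + 1) (hard_stop - window)
instance (text : String) (start : Int) (hard_stop : Int) (window : Int) : Decidable (Pre_find_preferred_stop_py text start hard_stop window) := by unfold Pre_find_preferred_stop_py; infer_instance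

def pvWitness_find_preferred_stop_py : String × Int × Int × Int := ("a. b", 0, 4, 4)

def Spec_find_preferred_stop_py (text : String) (start : Int) (hard_stop : Int) (window : Int) (out : Int) : Prop := out = find_preferred_stop_py_alt text start hard_stop window
instance (text : String) (start : Int) (hard_stop : Int) (window : Int) (out : Int) : Decidable (Spec_find_preferred_stop_py text start hard_stop window out) := by unfold Spec_find_preferred_stop_py; infer_instance

-- ===== CLAIM (what is proved, stated in full; the proofs are below) =====
def Claim_equal_find_preferred_stop_py : Prop := ∀ (text : String) (start : Int) (hard_stop : Int) (window : Int), Dom_find_preferred_stop_py text start hard_stop window → Pre_find_preferred_stop_py text start hard_stop window → Spec_find_preferred_stop_py text start hard_stop window (find_preferred_stop_py text start hard_stop window)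

-- ===== LEMMAS AND PROOFS =====

-- Python's slice-bound normalisation, exactly as performed inside PySem.Chars.rfindFrom
def pvNormLo (n : Int) (a : Int) : Int := if a < 0 then (if a + n < 0 then 0 else a + n) else a
def pvNormHi (n : Int) (e : Int) : Int := if n < e then n else if e < 0 then (if e + n < 0 then 0 else e + n) else e

-- the core of rfindFrom after bound normalisation
def pvRcand (s sub : List Char) (st hi : Int) : Int :=
  if hi < st then -1
  else
    let r := PySem.Chars.rfind (List.drop st.toNat (List.take hi.toNat s)) sub
    if r = -1 then -1 else st + r

lemma pvRfindFrom_eq (s sub : List Char) (start stop : Int) :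
    PySem.Chars.rfindFrom s sub start (some stop)
      = pvRcand s sub (pvNormLo s.length start) (pvNormHi s.length stop) := rfl

lemma pvNormLo_of_nonneg (n a : Int) (h : 0 ≤ a) : pvNormLo n a = a := by
  unfold pvNormLo; split_ifs <;> omega

lemma pvNormHi_of_nonneg (n e : Int) (hn : 0 ≤ n) (h : 0 ≤ e) : pvNormHi n e = min e n := by
  unfold pvNormHi; split_ifs <;> omega

lemma pvGo_spec (t sub : List Char) (k : Nat) :
    (PySem.Chars.rfind.go t sub k = -1 ∧ ∀ j ≤ k, sub.isPrefixOf (t.drop j) = false)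
    ∨ (∃ j : Nat, PySem.Chars.rfind.go t sub k = (j : Int) ∧ j ≤ k ∧
        sub.isPrefixOf (t.drop j) = true ∧
        ∀ j', j < j' → j' ≤ k → sub.isPrefixOf (t.drop j') = false) := by
  induction k with
  | zero =>
    rw [PySem.Chars.rfind.go]
    by_cases h : sub.isPrefixOf t = true
    · right; exact ⟨0, by simp [h], le_refl 0, by simpa using h, by omega⟩
    · left
      constructor
      · simp [h]
      · intro j hj; interval_cases j; exact Bool.eq_false_iff.mpr h
  | succ k ih =>
    rw [PySem.Chars.rfind.go]
    by_cases h : sub.isPrefixOf (t.drop (k+1)) = true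
    · right
      exact ⟨k+1, by simp [h], le_refl _, h, by omega⟩
    · simp only [h]
      rcases ih with ⟨h1, h2⟩ | ⟨j, hj1, hj2, hj3, hj4⟩
      · left
        refine ⟨h1, fun j hj => ?_⟩
        rcases Nat.lt_or_ge j (k+1) with hlt | hge
        · exact h2 j (by omega)
        · have : j = k+1 := by omega
          subst this; exact Bool.eq_false_iff.mpr h
      · right
        refine ⟨j, hj1, by omega, hj3, fun j' hlt hle => ?_⟩
        rcases Nat.lt_or_ge j' (k+1) with hlt' | hge'
        · exact hj4 j' hlt (by omega)
        · have : j' = k+1 := by omega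
          subst this; exact Bool.eq_false_iff.mpr h

lemma pvPrefix_nil_false (sub : List Char) (hsub : sub ≠ []) (j : Nat) (t : List Char) (hj : t.length < j) :
    sub.isPrefixOf (t.drop j) = false := by
  have h0 : t.drop j = [] := List.drop_eq_nil_of_le (by omega)
  rw [h0, Bool.eq_false_iff]
  intro hc
  exact hsub (List.prefix_nil.mp (List.isPrefixOf_iff_prefix.mp hc))

lemma pvRfind_spec (t sub : List Char) (hsub : sub ≠ []) :
    (PySem.Chars.rfind t sub = -1 ∧ ∀ j : Nat, sub.isPrefixOf (t.drop j) = false)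
    ∨ (∃ j : Nat, PySem.Chars.rfind t sub = (j : Int) ∧
        sub.isPrefixOf (t.drop j) = true ∧
        ∀ j', j < j' → sub.isPrefixOf (t.drop j') = false) := by
  have hdef : PySem.Chars.rfind t sub = PySem.Chars.rfind.go t sub t.length := rfl
  rcases pvGo_spec t sub t.length with ⟨h1, h2⟩ | ⟨j, hj1, hj2, hj3, hj4⟩
  · left
    refine ⟨hdef ▸ h1, fun j => ?_⟩
    rcases Nat.lt_or_ge t.length j with h | h
    · exact pvPrefix_nil_false sub hsub j t h
    · exact h2 j h
  · right
    refine ⟨j, hdef ▸ hj1, hj3, fun j' hlt => ?_⟩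
    rcases Nat.lt_or_ge t.length j' with h | h
    · exact pvPrefix_nil_false sub hsub j' t h
    · exact hj4 j' hlt h

lemma pvPrefix_slice_iff (s sub : List Char) (hsub : sub ≠ []) (a e : Nat) :
    sub.isPrefixOf ((s.take e).drop a) = true
      ↔ (a + sub.length ≤ e ∧ (s.drop a).take sub.length = sub) := by
  have hne : 0 < sub.length := List.length_pos_iff.mpr hsub
  rw [List.isPrefixOf_iff_prefix, List.prefix_iff_eq_take, List.drop_take, List.take_take]
  constructor
  · intro h
    have hlen := congrArg List.length h
    simp at hlen
    have h1 : a + sub.length ≤ e := by omega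
    have hmin : min sub.length (e - a) = sub.length := by omega
    rw [hmin] at h
    exact ⟨h1, h.symm⟩
  · rintro ⟨h1, h2⟩
    have hmin : min sub.length (e - a) = sub.length := by omega
    rw [hmin, h2]

-- pvDHit: the test Source B makes for one delimiter at end position x, as a Prop over Nat data
def pvDHit (s : List Char) (a x : Nat) (sub : List Char) : Prop :=
  a + sub.length ≤ x ∧ (s.drop (x - sub.length)).take sub.length = sub

lemma pvAltHit_iff (s : List Char) (a x : Nat) :
    pvAltHit s (a : Int) (x : Int) = true
      ↔ ∃ d ∈ pvBoundaries, pvDHit s a x d.toList := by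
  unfold pvAltHit
  rw [List.any_eq_true]
  constructor
  · rintro ⟨d, hd, hb⟩
    simp only [Bool.and_eq_true, decide_eq_true_eq, beq_iff_eq] at hb
    obtain ⟨h1, h2⟩ := hb
    have hLlen : (PySem.Str.len d : Int) = (d.toList.length : Int) := by simp [PySem.Str.len]
    rw [hLlen] at h1 h2
    have hL : d.toList.length ≤ x := by omega
    refine ⟨d, hd, by omega, ?_⟩
    rw [PySem.List.slice_toNat s (a := (x:Int) - (d.toList.length:Int)) (b := (x:Int)) (by omega) (by omega)] at h2
    have e1 : ((x : Int) - (d.toList.length : Int)).toNat = x - d.toList.length := by omega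
    rw [e1] at h2
    have e2 : (x : Int).toNat - (x - d.toList.length) = d.toList.length := by omega
    rw [e2] at h2
    exact h2
  · rintro ⟨d, hd, h1, h2⟩
    refine ⟨d, hd, ?_⟩
    simp only [Bool.and_eq_true, decide_eq_true_eq, beq_iff_eq]
    have hLlen : (PySem.Str.len d : Int) = (d.toList.length : Int) := by simp [PySem.Str.len]
    rw [hLlen]
    refine ⟨by omega, ?_⟩
    rw [PySem.List.slice_toNat s (a := (x:Int) - (d.toList.length:Int)) (b := (x:Int)) (by omega) (by omega)]
    have e1 : ((x : Int) - (d.toList.length : Int)).toNat = x - d.toList.length := by omega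
    rw [e1]
    have e2 : (x : Int).toNat - (x - d.toList.length) = d.toList.length := by omega
    rw [e2]
    exact h2

lemma pvCand_spec (s sub : List Char) (hsub : sub ≠ []) (a b : Nat) :
    (pvRcand s sub (a : Int) (b : Int) = -1 ∧ ∀ x : Nat, a < x → x ≤ b → ¬ pvDHit s a x sub)
    ∨ (∃ x : Nat, a < x ∧ x ≤ b ∧ pvDHit s a x sub ∧
        pvRcand s sub (a : Int) (b : Int) + sub.length = (x : Int) ∧
        pvRcand s sub (a : Int) (b : Int) ≠ -1 ∧
        ∀ x' : Nat, a < x' → x' ≤ b → pvDHit s a x' sub → x' ≤ x) := by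
  have hL : 0 < sub.length := List.length_pos_iff.mpr hsub
  by_cases hab : (b : Int) < (a : Int)
  · left
    refine ⟨by simp [pvRcand, hab], fun x hx1 hx2 => by omega⟩
  · have hts : List.drop ((a : Int)).toNat (List.take ((b : Int)).toNat s)
        = List.drop a (List.take b s) := by simp
    have hrc : pvRcand s sub (a : Int) (b : Int)
        = (if PySem.Chars.rfind (List.drop a (List.take b s)) sub = -1 then -1
           else (a : Int) + PySem.Chars.rfind (List.drop a (List.take b s)) sub) := by
      simp only [pvRcand, if_neg hab, hts]
    have hdropj : ∀ j : Nat, (List.drop a (List.take b s)).drop j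
        = (s.take b).drop (a + j) := by
      intro j
      simp [List.drop_drop]
    have hDtoPref : ∀ x : Nat, a < x → x ≤ b → pvDHit s a x sub →
        sub.isPrefixOf ((List.drop a (List.take b s)).drop (x - sub.length - a)) = true := by
      rintro x hx1 hx2 ⟨hd1, hd2⟩
      rw [hdropj]
      apply (pvPrefix_slice_iff s sub hsub (a + (x - sub.length - a)) b).mpr
      have hax : a + (x - sub.length - a) = x - sub.length := by omega
      rw [hax]
      exact ⟨by omega, hd2⟩
    rcases pvRfind_spec (List.drop a (List.take b s)) sub hsub with
      ⟨h1, h2⟩ | ⟨j, hj1, hj2, hj4⟩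
    · left
      refine ⟨by rw [hrc, if_pos h1], fun x hx1 hx2 hd => ?_⟩
      have hpref := hDtoPref x hx1 hx2 hd
      rw [h2 (x - sub.length - a)] at hpref
      exact Bool.false_ne_true hpref
    · right
      rw [hdropj] at hj2
      obtain ⟨hfit, htake⟩ := (pvPrefix_slice_iff s sub hsub (a + j) b).mp hj2
      have hne : PySem.Chars.rfind (List.drop a (List.take b s)) sub ≠ -1 := by
        rw [hj1]; omega
      have hval : pvRcand s sub (a : Int) (b : Int) = (a : Int) + j := by
        rw [hrc, if_neg hne, hj1]
      refine ⟨a + j + sub.length, by omega, by omega, ?_, ?_, ?_, ?_⟩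
      · refine ⟨by omega, ?_⟩
        have hax : a + j + sub.length - sub.length = a + j := by omega
        rw [hax]
        exact htake
      · rw [hval]; push_cast; ring
      · rw [hval]; omega
      · rintro x' hx1 hx2 hd
        by_contra hgt
        have hpref := hDtoPref x' hx1 hx2 hd
        rw [hj4 (x' - sub.length - a) (by omega)] at hpref
        exact Bool.false_ne_true hpref

lemma pvScan_spec (s : List Char) (a : Nat)
    (hpos : ∀ x : Int, pvAltHit s (a : Int) x = true → (a : Int) < x) :
    ∀ (f : Nat) (e : Int), e - f ≤ (a : Int) →
    (pvAltScan s (a : Int) e f = -1 ∧ ∀ x : Int, (a : Int) < x → x ≤ e → pvAltHit s (a : Int) x = false)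
    ∨ (pvAltScan s (a : Int) e f ≤ e ∧ (a : Int) < pvAltScan s (a : Int) e f ∧
        pvAltHit s (a : Int) (pvAltScan s (a : Int) e f) = true ∧
        ∀ x : Int, pvAltScan s (a : Int) e f < x → x ≤ e → pvAltHit s (a : Int) x = false) := by
  intro f
  induction f with
  | zero =>
    intro e hlow
    left
    exact ⟨rfl, fun x hx1 hx2 => by simp at hlow; omega⟩
  | succ f ih =>
    intro e hlow
    have hstep : pvAltScan s (a : Int) e (f + 1)
        = if pvAltHit s (a : Int) e then e else pvAltScan s (a : Int) (e - 1) f := rfl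
    by_cases h : pvAltHit s (a : Int) e = true
    · right
      rw [hstep, if_pos h]
      exact ⟨le_refl _, hpos e h, h, fun x hx1 hx2 => by omega⟩
    · have hfalse : pvAltHit s (a : Int) e = false := Bool.eq_false_iff.mpr h
      rw [hstep, if_neg h]
      rcases ih (e - 1) (by push_cast at hlow ⊢; omega) with ⟨h1, h2⟩ | ⟨h1, h2, h3, h4⟩
      · left
        refine ⟨h1, fun x hx1 hx2 => ?_⟩
        rcases eq_or_lt_of_le hx2 with heq | hlt
        · subst heq; exact hfalse
        · exact h2 x hx1 (by omega)
      · right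
        refine ⟨by omega, h2, h3, fun x hx1 hx2 => ?_⟩
        rcases eq_or_lt_of_le hx2 with heq | hlt
        · subst heq; exact hfalse
        · exact h4 x hx1 (by omega)

def pvStep (s : List Char) (a b : Int) (best : Int) (delimiter : String) : Int :=
  let idx := pvRcand s delimiter.toList a b
  if idx ≠ -1 then
    let candidate_end := idx + (PySem.Str.len delimiter : Int)
    if candidate_end > best then candidate_end else best
  else best

def pvF (s : List Char) (a b : Int) (d : String) : Int :=
  if pvRcand s d.toList a b = -1 then -1 else pvRcand s d.toList a b + (PySem.Str.len d : Int)

lemma pvStep_eq_max (s : List Char) (a b best : Int) (d : String) (h : -1 ≤ best) :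
    pvStep s a b best d = max best (pvF s a b d) := by
  simp only [pvStep, pvF]
  split_ifs <;> omega

lemma pvFold_eq_foldmax (s : List Char) (a b : Int) (ds : List String) :
    ∀ init : Int, -1 ≤ init →
    ds.foldl (pvStep s a b) init = ds.foldl (fun best d => max best (pvF s a b d)) init := by
  induction ds with
  | nil => intro init h; rfl
  | cons d ds ih =>
    intro init h
    simp only [List.foldl_cons]
    rw [pvStep_eq_max s a b init d h]
    exact ih _ (by omega)

lemma pvFoldmax_spec {α : Type} (f : α → Int) (ds : List α) :
    ∀ init : Int,
      init ≤ ds.foldl (fun best d => max best (f d)) init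
      ∧ (∀ d ∈ ds, f d ≤ ds.foldl (fun best d => max best (f d)) init)
      ∧ (ds.foldl (fun best d => max best (f d)) init = init
         ∨ ∃ d ∈ ds, ds.foldl (fun best d => max best (f d)) init = f d) := by
  induction ds with
  | nil => intro init; exact ⟨le_refl _, by simp, Or.inl rfl⟩
  | cons d ds ih =>
    intro init
    simp only [List.foldl_cons]
    obtain ⟨ih1, ih2, ih3⟩ := ih (max init (f d))
    refine ⟨by omega, ?_, ?_⟩
    · intro d' hd'
      rcases List.mem_cons.mp hd' with rfl | hmem
      · omega
      · exact ih2 d' hmem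
    · rcases ih3 with heq | ⟨d', hd', heq⟩
      · rcases max_cases init (f d) with ⟨hm, _⟩ | ⟨hm, _⟩
        · left; rw [heq, hm]
        · right; exact ⟨d, List.mem_cons_self, by rw [heq, hm]⟩
      · right; exact ⟨d', List.mem_cons_of_mem _ hd', heq⟩

-- every boundary delimiter is a non-empty string
lemma pvBoundaries_ne_nil : ∀ d ∈ pvBoundaries, d.toList ≠ [] := by decide

lemma pvHit_pos (s : List Char) (a : Nat) :
    ∀ x : Int, pvAltHit s (a : Int) x = true → (a : Int) < x := by
  intro x hx
  unfold pvAltHit at hx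
  rw [List.any_eq_true] at hx
  obtain ⟨d, hd, hb⟩ := hx
  simp only [Bool.and_eq_true, decide_eq_true_eq] at hb
  have hLlen : (PySem.Str.len d : Int) = (d.toList.length : Int) := by simp [PySem.Str.len]
  have hne : 0 < d.toList.length :=
    List.length_pos_iff.mpr (pvBoundaries_ne_nil d hd)
  have := hb.1
  rw [hLlen] at this
  omega

-- a value that is -1-with-no-hit or the greatest hit in (a, b] is unique
lemma pvMax_unique (s : List Char) (a : Nat) (b r1 r2 : Int)
    (h1 : (r1 = -1 ∧ ∀ x : Int, (a : Int) < x → x ≤ b → pvAltHit s (a : Int) x = false)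
        ∨ (r1 ≤ b ∧ (a : Int) < r1 ∧ pvAltHit s (a : Int) r1 = true ∧
            ∀ x : Int, r1 < x → x ≤ b → pvAltHit s (a : Int) x = false))
    (h2 : (r2 = -1 ∧ ∀ x : Int, (a : Int) < x → x ≤ b → pvAltHit s (a : Int) x = false)
        ∨ (r2 ≤ b ∧ (a : Int) < r2 ∧ pvAltHit s (a : Int) r2 = true ∧
            ∀ x : Int, r2 < x → x ≤ b → pvAltHit s (a : Int) x = false)) : r1 = r2 := by
  rcases h1 with ⟨e1, n1⟩ | ⟨b1, g1, t1, m1⟩ <;> rcases h2 with ⟨e2, n2⟩ | ⟨b2, g2, t2, m2⟩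
  · rw [e1, e2]
  · exact absurd t2 (by rw [n1 r2 g2 b2]; simp)
  · exact absurd t1 (by rw [n2 r1 g1 b1]; simp)
  · rcases lt_trichotomy r1 r2 with h | h | h
    · exact absurd t2 (by rw [m1 r2 h b2]; simp)
    · exact h
    · exact absurd t1 (by rw [m2 r1 h b1]; simp)

-- A's fold (with normalised bounds) is -1-with-no-hit or the greatest hit in (a, b]
lemma pvFoldA_char (s : List Char) (a b : Nat) :
    let r := pvBoundaries.foldl (pvStep s (a : Int) (b : Int)) (-1)
    (r = -1 ∧ ∀ x : Int, (a : Int) < x → x ≤ b → pvAltHit s (a : Int) x = false)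
    ∨ (r ≤ b ∧ (a : Int) < r ∧ pvAltHit s (a : Int) r = true ∧
        ∀ x : Int, r < x → x ≤ b → pvAltHit s (a : Int) x = false) := by
  intro r
  have hr : r = pvBoundaries.foldl (fun best d => max best (pvF s (a : Int) (b : Int) d)) (-1) :=
    pvFold_eq_foldmax s (a : Int) (b : Int) pvBoundaries (-1) (le_refl _)
  obtain ⟨hinit, hub, hcases⟩ := pvFoldmax_spec (pvF s (a : Int) (b : Int)) pvBoundaries (-1)
  rw [← hr] at hinit hub hcases
  have hno : ∀ x : Int, r < x → x ≤ b → pvAltHit s (a : Int) x = false := by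
    intro x hx1 hx2
    rw [Bool.eq_false_iff]
    intro hhit
    have hx0 : 0 ≤ x := by omega
    obtain ⟨xn, rfl⟩ : ∃ xn : Nat, x = (xn : Int) := ⟨x.toNat, by omega⟩
    obtain ⟨d, hd, hdhit⟩ := (pvAltHit_iff s a xn).mp hhit
    have hax : a < xn := by have := pvHit_pos s a (xn : Int) hhit; omega
    rcases pvCand_spec s d.toList (pvBoundaries_ne_nil d hd) a b with ⟨hc1, hc2⟩ | ⟨x0, hx01, hx02, hx03, hx04, hx05, hx06⟩
    · exact hc2 xn hax (by omega) hdhit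
    · have hFd : pvF s (a : Int) (b : Int) d = (x0 : Int) := by
        unfold pvF
        rw [if_neg hx05]
        have hLlen : (PySem.Str.len d : Int) = (d.toList.length : Int) := by simp [PySem.Str.len]
        rw [hLlen]
        exact hx04
      have hle := hub d (hd)
      have := hx06 xn hax (by omega) hdhit
      rw [hFd] at hle
      omega
  rcases eq_or_lt_of_le hinit with heq | hlt
  · left
    exact ⟨heq.symm, fun x hx1 hx2 => hno x (by omega) hx2⟩
  · right
    rcases hcases with heq | ⟨d, hd, heq⟩
    · omega
    · rcases pvCand_spec s d.toList (pvBoundaries_ne_nil d (hd)) a b with ⟨hc1, hc2⟩ | ⟨x0, hx01, hx02, hx03, hx04, hx05, hx06⟩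
      · rw [heq] at hlt
        unfold pvF at hlt
        rw [if_pos hc1] at hlt
        omega
      · have hFd : pvF s (a : Int) (b : Int) d = (x0 : Int) := by
          unfold pvF
          rw [if_neg hx05]
          have hLlen : (PySem.Str.len d : Int) = (d.toList.length : Int) := by simp [PySem.Str.len]
          rw [hLlen]
          exact hx04
        rw [hFd] at heq
        have hhit : pvAltHit s (a : Int) (x0 : Int) = true :=
          (pvAltHit_iff s a x0).mpr ⟨d, hd, hx03⟩
        refine ⟨by omega, by omega, by rw [heq]; exact hhit, by rw [heq] at hno ⊢; exact hno⟩

-- ===== VERDICT (by name: the statement is the Claim_ definition above) =====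
theorem find_preferred_stop_py_spec : Claim_equal_find_preferred_stop_py := by
  intro text start hard_stop window _hdom hpre
  obtain ⟨hhs0, hss0⟩ := hpre
  unfold Spec_find_preferred_stop_py find_preferred_stop_py find_preferred_stop_py_alt
  dsimp only
  set s := text.toList with hs
  set n : Int := (s.length : Int) with hn
  have hn0 : 0 ≤ n := by positivity
  set ss := max (start + 1) (hard_stop - window) with hss
  -- under Pre_ the normalised rfind bounds are ss and min hard_stop n
  have hlo : pvNormLo n ss = ss := pvNormLo_of_nonneg n ss hss0
  have hhi : pvNormHi n hard_stop = min hard_stop n := pvNormHi_of_nonneg n hard_stop hn0 hhs0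
  obtain ⟨a, ha⟩ : ∃ a : Nat, ss = (a : Int) := ⟨ss.toNat, by omega⟩
  obtain ⟨b, hb⟩ : ∃ b : Nat, min hard_stop n = (b : Int) := ⟨(min hard_stop n).toNat, by omega⟩
  -- rewrite A's fold into pvStep form
  have hfold : (pvBoundaries.foldl
      (fun best delimiter =>
        let idx := PySem.Str.rfindFrom text delimiter ss (some hard_stop)
        if idx ≠ -1 then
          let candidate_end := idx + (PySem.Str.len delimiter : Int)
          if candidate_end > best then candidate_end else best
        else best) (-1))
      = pvBoundaries.foldl (pvStep s (a : Int) (b : Int)) (-1) := by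
    have hlam : (fun (best : Int) (delimiter : String) =>
        let idx := PySem.Str.rfindFrom text delimiter ss (some hard_stop)
        if idx ≠ -1 then
          let candidate_end := idx + (PySem.Str.len delimiter : Int)
          if candidate_end > best then candidate_end else best
        else best) = pvStep s (a : Int) (b : Int) := by
      funext best d
      have hrf : PySem.Str.rfindFrom text d ss (some hard_stop)
          = pvRcand s d.toList ss (min hard_stop n) := by
        show PySem.Chars.rfindFrom text.toList d.toList ss (some hard_stop) = _
        rw [pvRfindFrom_eq]
        rw [show ((text.toList.length : Int)) = n from rfl, hlo, hhi]
      rw [← ha, ← hb]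
      simp only [pvStep, hrf]
    rw [hlam]
  rw [hfold, ha, hb]
  have hsub : ((b : Int) - (a : Int)).toNat = b - a := by omega
  rw [hsub]
  exact pvMax_unique s a (b : Int)
    (pvBoundaries.foldl (pvStep s (a : Int) (b : Int)) (-1))
    (pvAltScan s (a : Int) (b : Int) (b - a))
    (pvFoldA_char s a b)
    (pvScan_spec s a (pvHit_pos s a) (b - a) (b : Int) (by omega))
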